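-- pv_equiv track=rewrite | github.com/skanndar/ml-training | scripts/audit_dataset.py | classify_region
-- ===== SOURCE A (Python) =====
-- def classify_region(countries: list, continents: list) -> str:
--     """Classify a plant into a geographic region."""
--
--     EU_SW = {'ES', 'PT', 'FR', 'IT', 'AD', 'MC', 'SM', 'VA', 'GI'}
--     EU_NORTH = {'DE', 'UK', 'GB', 'NL', 'BE', 'AT', 'CH', 'SE', 'NO', 'DK', 'FI', 'IE', 'PL', 'CZ'}
--     EU_EAST = {'RO', 'BG', 'HU', 'SK', 'UA', 'BY', 'RU', 'HR', 'SI', 'RS', 'BA', 'MK', 'AL', 'ME', 'XK'}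
--
--     countries_set = set(countries)
--
--     if countries_set & EU_SW:
--         return 'EU_SW'
--     elif countries_set & EU_NORTH:
--         return 'EU_NORTH'
--     elif countries_set & EU_EAST:
--         return 'EU_EAST'
--     elif 'Europe' in continents:
--         return 'EU_OTHER'
--     elif 'North America' in continents or any(c in countries_set for c in ['US', 'CA', 'MX']):
--         return 'AMERICAS_NORTH'
--     elif 'South America' in continents:
--         return 'AMERICAS_SOUTH'
--     elif 'Asia' in continents:
--         return 'ASIA'
--     elif 'Africa' in continents:
--         return 'AFRICA'
--     elif 'Oceania' in continents or 'Australia' in continents: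
--         return 'OCEANIA'
--     else:
--         return 'UNKNOWN'
-- ===== SOURCE B (Python) =====
-- # One flat country->(priority, label) table scanned in a single pass, instead of
-- # three separate set intersections; ties across region sets resolved by priority rank.
-- _REGION = {}
-- for _label, _rank, _codes in (
--     ('EU_SW', 0, 'ES PT FR IT AD MC SM VA GI'),
--     ('EU_NORTH', 1, 'DE UK GB NL BE AT CH SE NO DK FI IE PL CZ'),
--     ('EU_EAST', 2, 'RO BG HU SK UA BY RU HR SI RS BA MK AL ME XK'),
-- ):
--     for _c in _codes.split():
--         _REGION[_c] = (_rank, _label)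
--
--
-- def classify_region(countries: list, continents: list) -> str:
--     """Classify a plant into a geographic region."""
--     best = None
--     for c in countries:
--         hit = _REGION.get(c)
--         if hit is not None and (best is None or hit[0] < best[0]):
--             best = hit
--     if best is not None:
--         return best[1]
--     if 'Europe' in continents:
--         return 'EU_OTHER'
--     if 'North America' in continents or not {'US', 'CA', 'MX'}.isdisjoint(countries):
--         return 'AMERICAS_NORTH'
--     if 'South America' in continents:
--         return 'AMERICAS_SOUTH'
--     if 'Asia' in continents:
--         return 'ASIA'
--     if 'Africa' in continents:
--         return 'AFRICA'
--     if 'Oceania' in continents or 'Australia' in continents: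
--         return 'OCEANIA'
--     return 'UNKNOWN'
-- ===== Notes on version B (the rewrite author's own statement) =====
-- stated objective: alternative
-- what changed: Replaces building a set of the input countries and intersecting it with three region sets by a single pass over the countries that looks each up in one flat country->(priority,label) dict and keeps the lowest-priority hit.
import Mathlib
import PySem

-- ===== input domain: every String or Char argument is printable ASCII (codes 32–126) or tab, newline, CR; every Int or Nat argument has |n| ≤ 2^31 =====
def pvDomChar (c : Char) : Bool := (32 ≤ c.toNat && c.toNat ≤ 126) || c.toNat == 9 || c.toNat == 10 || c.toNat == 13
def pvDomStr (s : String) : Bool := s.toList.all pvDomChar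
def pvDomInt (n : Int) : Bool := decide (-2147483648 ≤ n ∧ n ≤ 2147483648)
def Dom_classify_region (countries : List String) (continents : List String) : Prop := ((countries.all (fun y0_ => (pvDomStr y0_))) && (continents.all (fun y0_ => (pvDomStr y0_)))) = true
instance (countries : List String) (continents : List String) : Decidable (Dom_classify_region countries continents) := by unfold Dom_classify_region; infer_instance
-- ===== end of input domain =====

-- B replaces A's three set intersections by one pass over the countries through a flat
-- country -> (priority, label) table, keeping the lowest-priority hit (alternative decomposition, same cost).

-- ===== PORT A =====
def classify_region (countries : List String) (continents : List String) : String :=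
  let EU_SW : PySem.Set String := PySem.Set.ofList ["ES", "PT", "FR", "IT", "AD", "MC", "SM", "VA", "GI"]
  let EU_NORTH : PySem.Set String := PySem.Set.ofList ["DE", "UK", "GB", "NL", "BE", "AT", "CH", "SE", "NO", "DK", "FI", "IE", "PL", "CZ"]
  let EU_EAST : PySem.Set String := PySem.Set.ofList ["RO", "BG", "HU", "SK", "UA", "BY", "RU", "HR", "SI", "RS", "BA", "MK", "AL", "ME", "XK"]
  let countries_set : PySem.Set String := PySem.Set.ofList countries
  if !(PySem.Set.inter countries_set EU_SW).isEmpty then "EU_SW"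
  else if !(PySem.Set.inter countries_set EU_NORTH).isEmpty then "EU_NORTH"
  else if !(PySem.Set.inter countries_set EU_EAST).isEmpty then "EU_EAST"
  else if continents.contains "Europe" then "EU_OTHER"
  else if continents.contains "North America" || ["US", "CA", "MX"].any (fun c => PySem.Set.contains countries_set c) then "AMERICAS_NORTH"
  else if continents.contains "South America" then "AMERICAS_SOUTH"
  else if continents.contains "Asia" then "ASIA"
  else if continents.contains "Africa" then "AFRICA"
  else if continents.contains "Oceania" || continents.contains "Australia" then "OCEANIA"
  else "UNKNOWN"

-- ===== PORT B =====
-- _REGION: the module-level dict Source B builds once at import time, written out as the literal dict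
def pvRegionDict : PySem.Dict String (Nat × String) := PySem.Dict.ofList
  [("ES", (0, "EU_SW")), ("PT", (0, "EU_SW")), ("FR", (0, "EU_SW")), ("IT", (0, "EU_SW")),
   ("AD", (0, "EU_SW")), ("MC", (0, "EU_SW")), ("SM", (0, "EU_SW")), ("VA", (0, "EU_SW")), ("GI", (0, "EU_SW")),
   ("DE", (1, "EU_NORTH")), ("UK", (1, "EU_NORTH")), ("GB", (1, "EU_NORTH")), ("NL", (1, "EU_NORTH")),
   ("BE", (1, "EU_NORTH")), ("AT", (1, "EU_NORTH")), ("CH", (1, "EU_NORTH")), ("SE", (1, "EU_NORTH")),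
   ("NO", (1, "EU_NORTH")), ("DK", (1, "EU_NORTH")), ("FI", (1, "EU_NORTH")), ("IE", (1, "EU_NORTH")),
   ("PL", (1, "EU_NORTH")), ("CZ", (1, "EU_NORTH")),
   ("RO", (2, "EU_EAST")), ("BG", (2, "EU_EAST")), ("HU", (2, "EU_EAST")), ("SK", (2, "EU_EAST")),
   ("UA", (2, "EU_EAST")), ("BY", (2, "EU_EAST")), ("RU", (2, "EU_EAST")), ("HR", (2, "EU_EAST")),
   ("SI", (2, "EU_EAST")), ("RS", (2, "EU_EAST")), ("BA", (2, "EU_EAST")), ("MK", (2, "EU_EAST")),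
   ("AL", (2, "EU_EAST")), ("ME", (2, "EU_EAST")), ("XK", (2, "EU_EAST"))]

-- the body of Source B's single pass over the countries
def pvStep (best : Option (Nat × String)) (c : String) : Option (Nat × String) :=
  match PySem.Dict.get? pvRegionDict c with
  | none => best
  | some hit =>
    match best with
    | none => some hit
    | some b => if hit.1 < b.1 then some hit else best

def classify_region_alt (countries : List String) (continents : List String) : String :=
  match countries.foldl pvStep none with
  | some best => best.2
  | none =>
    if continents.contains "Europe" then "EU_OTHER"
    else if continents.contains "North America" || !(PySem.Set.isdisjoint (PySem.Set.ofList ["US", "CA", "MX"]) countries) then "AMERICAS_NORTH"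
    else if continents.contains "South America" then "AMERICAS_SOUTH"
    else if continents.contains "Asia" then "ASIA"
    else if continents.contains "Africa" then "AFRICA"
    else if continents.contains "Oceania" || continents.contains "Australia" then "OCEANIA"
    else "UNKNOWN"

-- ===== PRECONDITION & SPEC =====
def Spec_classify_region (countries : List String) (continents : List String) (out : String) : Prop := out = classify_region_alt countries continents
instance (countries : List String) (continents : List String) (out : String) : Decidable (Spec_classify_region countries continents out) := by unfold Spec_classify_region; infer_instance

-- ===== CLAIM (what is proved, stated in full; the proofs are below) =====
def Claim_equal_classify_region : Prop := ∀ (countries : List String) (continents : List String), Dom_classify_region countries continents → Spec_classify_region countries continents (classify_region countries continents)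

-- ===== LEMMAS AND PROOFS =====

-- abbreviations for the three code lists (proof-side only)
def pvSW : List String := ["ES", "PT", "FR", "IT", "AD", "MC", "SM", "VA", "GI"]
def pvN : List String := ["DE", "UK", "GB", "NL", "BE", "AT", "CH", "SE", "NO", "DK", "FI", "IE", "PL", "CZ"]
def pvE : List String := ["RO", "BG", "HU", "SK", "UA", "BY", "RU", "HR", "SI", "RS", "BA", "MK", "AL", "ME", "XK"]

-- lookup in a block of equal values of an association dict
theorem pv_get?_mk_map_const (codes : List String) (v : Nat × String)
    (rest : List (String × (Nat × String))) (c : String) :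
    PySem.Dict.get? (PySem.Dict.mk (codes.map (fun k => (k, v)) ++ rest)) c =
      if codes.contains c then some v else PySem.Dict.get? (PySem.Dict.mk rest) c := by
  induction codes with
  | nil => simp
  | cons k ks ih =>
    simp only [List.map_cons, List.cons_append, PySem.Dict.get?_mk_cons, List.contains_cons]
    by_cases hk : k = c
    · simp [hk]
    · simp [hk, Ne.symm hk, ih]

-- the dict lookup, characterised by membership in the three code lists
set_option maxRecDepth 10000 in
theorem pvRank_eq (c : String) :
    PySem.Dict.get? pvRegionDict c =
      if pvSW.contains c then some (0, "EU_SW")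
      else if pvN.contains c then some (1, "EU_NORTH")
      else if pvE.contains c then some (2, "EU_EAST")
      else none := by
  have hd : pvRegionDict = PySem.Dict.mk
      (pvSW.map (fun k => (k, ((0 : Nat), "EU_SW"))) ++
        (pvN.map (fun k => (k, ((1 : Nat), "EU_NORTH"))) ++
          (pvE.map (fun k => (k, ((2 : Nat), "EU_EAST"))) ++ []))) := by decide
  rw [hd, pv_get?_mk_map_const, pv_get?_mk_map_const, pv_get?_mk_map_const]
  simp [PySem.Dict.get?]

-- Python truthiness of 'set(countries) & S' equals an any-scan of the countries
theorem pvInter_eq (countries L : List String) :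
    (!(PySem.Set.inter (PySem.Set.ofList countries) (PySem.Set.ofList L)).isEmpty) =
      countries.any (fun c => L.contains c) := by
  rw [Bool.eq_iff_iff]
  simp [List.isEmpty_eq_false_iff, List.eq_nil_iff_forall_not_mem, PySem.Set.mem_inter,
    PySem.Set.mem_ofList, List.any_eq_true]

-- A's any-of-three membership test equals B's isdisjoint test
theorem pvAmericas_eq (countries : List String) :
    (["US", "CA", "MX"].any (fun c => PySem.Set.contains (PySem.Set.ofList countries) c)) =
      (!(PySem.Set.isdisjoint (PySem.Set.ofList ["US", "CA", "MX"]) countries)) := by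
  rw [Bool.eq_iff_iff]
  rw [show (PySem.Set.ofList ["US", "CA", "MX"] : List String) = ["US", "CA", "MX"] from rfl]
  simp [PySem.Set.isdisjoint, PySem.Set.mem_ofList]

-- closed form of Source B's scan, for the Option values the accumulator actually takes
theorem pvFold_eq (cs : List String) (best : Option (Nat × String))
    (hb : best = none ∨ best = some (0, "EU_SW") ∨ best = some (1, "EU_NORTH") ∨ best = some (2, "EU_EAST")) :
    cs.foldl pvStep best =
      if best = some (0, "EU_SW") ∨ cs.any (fun c => pvSW.contains c) then some (0, "EU_SW")
      else if best = some (1, "EU_NORTH") ∨ cs.any (fun c => pvN.contains c) then some (1, "EU_NORTH")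
      else if best = some (2, "EU_EAST") ∨ cs.any (fun c => pvE.contains c) then some (2, "EU_EAST")
      else none := by
  induction cs generalizing best with
  | nil => rcases hb with rfl | rfl | rfl | rfl <;> simp
  | cons c cs ih =>
    rw [List.foldl_cons]
    have hb' : pvStep best c = none ∨ pvStep best c = some (0, "EU_SW") ∨
        pvStep best c = some (1, "EU_NORTH") ∨ pvStep best c = some (2, "EU_EAST") := by
      unfold pvStep
      rw [pvRank_eq c]
      rcases hb with rfl | rfl | rfl | rfl <;>
        by_cases h1 : c ∈ pvSW <;>
        by_cases h2 : c ∈ pvN <;>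
        by_cases h3 : c ∈ pvE <;>
        simp [h1, h2, h3]
    rw [ih _ hb']
    unfold pvStep
    rw [pvRank_eq c]
    rcases hb with rfl | rfl | rfl | rfl <;>
      by_cases h1 : c ∈ pvSW <;>
      by_cases h2 : c ∈ pvN <;>
      by_cases h3 : c ∈ pvE <;>
      simp [h1, h2, h3]

-- ===== VERDICT (by name: the statement is the Claim_ definition above) =====
theorem classify_region_spec : Claim_equal_classify_region := by
  intro countries continents _
  unfold Spec_classify_region classify_region classify_region_alt
  simp only []
  rw [pvFold_eq countries none (Or.inl rfl)]
  rw [show (["ES", "PT", "FR", "IT", "AD", "MC", "SM", "VA", "GI"] : List String) = pvSW from rfl,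
    show (["DE", "UK", "GB", "NL", "BE", "AT", "CH", "SE", "NO", "DK", "FI", "IE", "PL", "CZ"] : List String) = pvN from rfl,
    show (["RO", "BG", "HU", "SK", "UA", "BY", "RU", "HR", "SI", "RS", "BA", "MK", "AL", "ME", "XK"] : List String) = pvE from rfl]
  rw [pvInter_eq countries pvSW, pvInter_eq countries pvN, pvInter_eq countries pvE, pvAmericas_eq countries]
  by_cases h1 : ∃ x ∈ countries, x ∈ pvSW <;>
  by_cases h2 : ∃ x ∈ countries, x ∈ pvN <;>
  by_cases h3 : ∃ x ∈ countries, x ∈ pvE <;>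
    simp [h1, h2, h3]
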